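-- pv_equiv track=rewrite | github.com/lobennett/poldrack_tedana | run_tedana.py | _parse_filename_components
-- ===== SOURCE A (Python) =====
-- from typing import Dict, List, Tuple, Optional
--
-- def _parse_filename_components(filename: str) -> Dict[str, str]:
--     """Extract BIDS components from filename."""
--     components = filename.split("_")
--     return {
--         "sub": next((comp for comp in components if comp.startswith("sub-")), None),
--         "ses": next((comp for comp in components if comp.startswith("ses-")), None),
--         "task": next(
--             (comp for comp in components if comp.startswith("task-")), None
--         ),
--         "run": next((comp for comp in components if comp.startswith("run-")), None),
--     }
-- ===== SOURCE B (Python) =====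
-- _PREFIX_TO_KEY = (("sub-", "sub"), ("ses-", "ses"), ("task-", "task"), ("run-", "run"))
--
-- def _parse_filename_components(filename: str):
--     """Single pass over the split components with a prefix table."""
--     result = {"sub": None, "ses": None, "task": None, "run": None}
--     for comp in filename.split("_"):
--         for prefix, key in _PREFIX_TO_KEY:
--             if comp.startswith(prefix) and result[key] is None:
--                 result[key] = comp
--     return result
-- ===== Notes on version B (the rewrite author's own statement) =====
-- stated objective: alternative
-- what changed: Replaces A's four independent next()-scans over the split components with one pre-seeded dict and a single pass that fills each still-None key via a prefix table (first match kept).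
import Mathlib
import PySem

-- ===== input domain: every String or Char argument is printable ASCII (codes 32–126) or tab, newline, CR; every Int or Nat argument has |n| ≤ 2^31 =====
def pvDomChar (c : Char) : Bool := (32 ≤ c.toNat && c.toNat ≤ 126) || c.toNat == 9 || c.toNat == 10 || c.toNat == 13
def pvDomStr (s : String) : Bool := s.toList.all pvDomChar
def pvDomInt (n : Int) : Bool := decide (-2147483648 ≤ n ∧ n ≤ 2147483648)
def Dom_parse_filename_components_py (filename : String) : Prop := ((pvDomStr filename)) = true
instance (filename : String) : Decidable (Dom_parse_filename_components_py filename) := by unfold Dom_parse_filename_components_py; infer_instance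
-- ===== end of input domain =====

-- B replaces A's four independent first-match scans with one pre-seeded table and a single pass (alternative decomposition; return value only).

-- ===== PORT A =====
def parse_filename_components_py (filename : String) : List (String × Option String) :=
  let components := ((PySem.Str.split? filename "_").getD [])
  [("sub", components.find? (fun comp => PySem.Str.startswith comp "sub-")),
   ("ses", components.find? (fun comp => PySem.Str.startswith comp "ses-")),
   ("task", components.find? (fun comp => PySem.Str.startswith comp "task-")),
   ("run", components.find? (fun comp => PySem.Str.startswith comp "run-"))]

-- ===== PORT B =====
-- state = the four result slots (sub, ses, task, run), in dict order
def pvStepB (st : Option String × Option String × Option String × Option String)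
    (comp : String) : Option String × Option String × Option String × Option String :=
  let st := if PySem.Str.startswith comp "sub-" && st.1.isNone then (some comp, st.2) else st
  let st := if PySem.Str.startswith comp "ses-" && st.2.1.isNone then (st.1, some comp, st.2.2) else st
  let st := if PySem.Str.startswith comp "task-" && st.2.2.1.isNone then (st.1, st.2.1, some comp, st.2.2.2) else st
  if PySem.Str.startswith comp "run-" && st.2.2.2.isNone then (st.1, st.2.1, st.2.2.1, some comp) else st

def parse_filename_components_py_alt (filename : String) : List (String × Option String) :=
  let st := (((PySem.Str.split? filename "_").getD [])).foldl pvStepB (none, none, none, none)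
  [("sub", st.1), ("ses", st.2.1), ("task", st.2.2.1), ("run", st.2.2.2)]

-- ===== PRECONDITION & SPEC =====
def Spec_parse_filename_components_py (filename : String) (out : List (String × Option String)) : Prop := out = parse_filename_components_py_alt filename
instance (filename : String) (out : List (String × Option String)) : Decidable (Spec_parse_filename_components_py filename out) := by unfold Spec_parse_filename_components_py; infer_instance

-- ===== CLAIM (what is proved, stated in full; the proofs are below) =====
def Claim_equal_parse_filename_components_py : Prop := ∀ (filename : String), Dom_parse_filename_components_py filename → Spec_parse_filename_components_py filename (parse_filename_components_py filename)

-- ===== LEMMAS AND PROOFS =====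

theorem pvStepB_proj (st : Option String × Option String × Option String × Option String) (comp : String) :
    pvStepB st comp =
      ((if PySem.Str.startswith comp "sub-" && st.1.isNone then some comp else st.1),
       (if PySem.Str.startswith comp "ses-" && st.2.1.isNone then some comp else st.2.1),
       (if PySem.Str.startswith comp "task-" && st.2.2.1.isNone then some comp else st.2.2.1),
       (if PySem.Str.startswith comp "run-" && st.2.2.2.isNone then some comp else st.2.2.2)) := by
  obtain ⟨a, b, c, d⟩ := st
  simp only [pvStepB]
  split_ifs <;> simp_all

theorem pvSlot_fold (p : String → Bool) (l : List String) (a : Option String)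
    (f : Option String × Option String × Option String × Option String → Option String)
    (hf : ∀ st comp, f (pvStepB st comp) = if p comp && (f st).isNone then some comp else f st) :
    ∀ st, f st = a → f (l.foldl pvStepB st) = (a.orElse fun _ => l.find? p) := by
  induction l generalizing a with
  | nil => intro st h; cases a <;> simp [h, Option.orElse]
  | cons x xs ih =>
    intro st h
    simp only [List.foldl_cons]
    cases a with
    | some v =>
      apply ih (some v)
      simp [hf, h]
    | none =>
      by_cases hp : p x = true
      · have := ih (some x) (st := pvStepB st x) (by simp [hf, h, hp])
        simp [this, List.find?, hp, Option.orElse]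
      · have := ih none (st := pvStepB st x) (by simp [hf, h, hp])
        simp [this, List.find?, hp]

theorem parse_filename_components_py_spec : Claim_equal_parse_filename_components_py := by
  intro filename _
  unfold Spec_parse_filename_components_py parse_filename_components_py parse_filename_components_py_alt
  have h1 := pvSlot_fold (fun c => PySem.Str.startswith c "sub-") (((PySem.Str.split? filename "_").getD [])) none
    (fun st => st.1) (by intro st comp; rw [pvStepB_proj]) (none, none, none, none) rfl
  have h2 := pvSlot_fold (fun c => PySem.Str.startswith c "ses-") (((PySem.Str.split? filename "_").getD [])) none
    (fun st => st.2.1) (by intro st comp; rw [pvStepB_proj]) (none, none, none, none) rfl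
  have h3 := pvSlot_fold (fun c => PySem.Str.startswith c "task-") (((PySem.Str.split? filename "_").getD [])) none
    (fun st => st.2.2.1) (by intro st comp; rw [pvStepB_proj]) (none, none, none, none) rfl
  have h4 := pvSlot_fold (fun c => PySem.Str.startswith c "run-") (((PySem.Str.split? filename "_").getD [])) none
    (fun st => st.2.2.2) (by intro st comp; rw [pvStepB_proj]) (none, none, none, none) rfl
  simp only at h1 h2 h3 h4
  simp [h1, h2, h3, h4, Option.orElse]
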